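-- pv_equiv track=rewrite | github.com/NSMobileCS/algo_practice | num_grid_from_text.py | get_bottom_diags
-- ===== SOURCE A (Python) =====
-- def get_bottom_diags(grid, min_length=4):
--     diags = []
--     for cdx in range(len(grid[0])): # or len(grid[-1]), it's the same
--         a, b = len(grid) - 1, cdx
--         r = [grid[a][b]]
--         a -= 1
--         b += 1
--         while (a > -1) and (b < len(grid[0])):
--             r.append(grid[a][b])
--             a -= 1
--             b += 1
--         if len(r) >= min_length:
--             diags.append(tuple(r))
--         a, b = len(grid) - 1, cdx
--         l = [grid[a][b]]
--         a -= 1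
--         b -= 1
--         while (a > -1) and (b > -1):
--             l.append(grid[a][b])
--             a -= 1
--             b -= 1
--         if len(l) >= min_length:
--             diags.append(tuple(l))
--     return tuple(diags)
-- ===== SOURCE B (Python) =====
-- def get_bottom_diags(grid, min_length=4):
--     # Alternative algorithm: one pass over the bottom min(n, m) band of cells,
--     # bucketing each cell into its two diagonals (keys a+b and a-b), rows taken
--     # bottom-up so each bucket is already ordered from the bottom row upward;
--     # then emit the buckets in A's right-then-left order per starting column.
--     n, m = len(grid), len(grid[0])
--     lo = n - min(n, m)  # rows above the bottom min(n, m) band lie on no reported diagonal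
--     right = {}  # key a+b -> up-right diagonal cells, bottom row first
--     left = {}   # key a-b -> up-left diagonal cells, bottom row first
--     for a in range(n - 1, lo - 1, -1):
--         for b in range(m):
--             x = grid[a][b]
--             right.setdefault(a + b, []).append(x)
--             left.setdefault(a - b, []).append(x)
--     out = []
--     for cdx in range(m):
--         r = right[n - 1 + cdx]
--         if len(r) >= min_length:
--             out.append(tuple(r))
--         l = left[n - 1 - cdx]
--         if len(l) >= min_length:
--             out.append(tuple(l))
--     return tuple(out)
-- ===== Notes on version B (the rewrite author's own statement) =====
-- stated objective: alternative
-- what changed: Instead of walking each diagonal cell-by-cell with a while loop per starting column, B makes one pass over the bottom min(n,m) band of cells, bucketing each cell into two dicts keyed by a+b (up-right diagonal) and a-b (up-left diagonal) with rows taken bottom-up, then emits the buckets in the same right-then-left per-column order.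
import Mathlib
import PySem

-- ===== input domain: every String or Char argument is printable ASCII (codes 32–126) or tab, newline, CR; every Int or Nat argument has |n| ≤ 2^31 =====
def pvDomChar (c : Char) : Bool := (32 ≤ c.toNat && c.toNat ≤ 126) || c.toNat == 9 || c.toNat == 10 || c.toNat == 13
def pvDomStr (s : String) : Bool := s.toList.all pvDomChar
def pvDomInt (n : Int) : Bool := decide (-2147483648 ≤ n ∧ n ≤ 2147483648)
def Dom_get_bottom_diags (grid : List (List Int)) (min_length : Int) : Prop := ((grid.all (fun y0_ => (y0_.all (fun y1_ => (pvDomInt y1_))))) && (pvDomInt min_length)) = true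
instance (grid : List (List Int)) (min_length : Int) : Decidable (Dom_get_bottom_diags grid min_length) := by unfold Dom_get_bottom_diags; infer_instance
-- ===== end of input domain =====

-- B replaces A's per-column diagonal walks by one bucketing pass over the bottom band of
-- cells (dicts keyed by a+b and a-b, rows bottom-up), then emits the buckets in A's order.

-- ===== PORT A =====

-- grid[a][b] (total form; Pre_ guarantees every access either Python performs is in range)
def pvCell (grid : List (List Int)) (a b : Int) : Int :=
  PySem.List.pyGetD (PySem.List.pyGetD grid a []) b 0

-- A's first while loop: while (a > -1) and (b < m): r.append(grid[a][b]); a -= 1; b += 1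
def pvWhileR (grid : List (List Int)) (m a b : Int) (r : List Int) : List Int :=
  if a > -1 ∧ b < m then
    pvWhileR grid m (a - 1) (b + 1) (r ++ [pvCell grid a b])
  else r
termination_by (a + 1).toNat
decreasing_by omega

-- A's second while loop: while (a > -1) and (b > -1): l.append(grid[a][b]); a -= 1; b -= 1
def pvWhileL (grid : List (List Int)) (a b : Int) (l : List Int) : List Int :=
  if a > -1 ∧ b > -1 then
    pvWhileL grid (a - 1) (b - 1) (l ++ [pvCell grid a b])
  else l
termination_by (a + 1).toNat
decreasing_by omega

def get_bottom_diags (grid : List (List Int)) (min_length : Int) : List (List Int) :=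
  let m : Int := (PySem.List.pyGetD grid 0 []).length
  (PySem.List.pyRange 0 m 1).foldl (fun diags cdx =>
    let a : Int := (grid.length : Int) - 1
    let r := pvWhileR grid m (a - 1) (cdx + 1) [pvCell grid a cdx]
    let diags := if min_length ≤ (r.length : Int) then diags ++ [r] else diags
    let l := pvWhileL grid (a - 1) (cdx - 1) [pvCell grid a cdx]
    if min_length ≤ (l.length : Int) then diags ++ [l] else diags) []

-- ===== PORT B =====

def get_bottom_diags_alt (grid : List (List Int)) (min_length : Int) : List (List Int) :=
  let n : Int := grid.length
  let m : Int := (PySem.List.pyGetD grid 0 []).length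
  let lo : Int := n - min n m
  let dicts :=
    (PySem.List.pyRange (n - 1) (lo - 1) (-1)).foldl
      (fun (rl : PySem.Dict Int (List Int) × PySem.Dict Int (List Int)) a =>
        (PySem.List.pyRange 0 m 1).foldl (fun rl b =>
          (rl.1.modify (a + b) [] (· ++ [pvCell grid a b]),
           rl.2.modify (a - b) [] (· ++ [pvCell grid a b]))) rl)
      (PySem.Dict.empty, PySem.Dict.empty)
  (PySem.List.pyRange 0 m 1).foldl (fun out cdx =>
    let r := dicts.1.getD (n - 1 + cdx) []
    let out := if min_length ≤ (r.length : Int) then out ++ [r] else out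
    let l := dicts.2.getD (n - 1 - cdx) []
    if min_length ≤ (l.length : Int) then out ++ [l] else out) []

-- ===== PRECONDITION & SPEC =====

-- Pre_ excludes exactly the inputs where the Python A raises IndexError: the empty grid
-- (grid[0]), and grids whose bottom min(n, m) rows are not all at least m = len(grid[0])
-- long (A reads column m-1 of each such row; rows above that band are never touched).
def Pre_get_bottom_diags (grid : List (List Int)) (min_length : Int) : Prop :=
  grid ≠ [] ∧
    ((grid.drop (grid.length - (grid.headD []).length)).all
      (fun row => (grid.headD []).length ≤ row.length)) = true

instance (grid : List (List Int)) (min_length : Int) : Decidable (Pre_get_bottom_diags grid min_length) := by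
  unfold Pre_get_bottom_diags; infer_instance

def pvWitness_get_bottom_diags : List (List Int) × Int := ([[1, 2], [3, 4]], 1)

def Spec_get_bottom_diags (grid : List (List Int)) (min_length : Int) (out : List (List Int)) : Prop := out = get_bottom_diags_alt grid min_length
instance (grid : List (List Int)) (min_length : Int) (out : List (List Int)) : Decidable (Spec_get_bottom_diags grid min_length out) := by unfold Spec_get_bottom_diags; infer_instance

-- ===== CLAIM (what is proved, stated in full; the proofs are below) =====
def Claim_equal_get_bottom_diags : Prop := ∀ (grid : List (List Int)) (min_length : Int), Dom_get_bottom_diags grid min_length → Pre_get_bottom_diags grid min_length → Spec_get_bottom_diags grid min_length (get_bottom_diags grid min_length)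

-- ===== LEMMAS AND PROOFS =====

theorem pv_map_range_succ (K : Nat) (f : Nat → Int) :
    (List.range (K + 1)).map f = f 0 :: (List.range K).map (fun k => f (k + 1)) := by
  rw [List.range_succ_eq_map]
  simp [List.map_map, Function.comp_def]

-- A's right while loop computes a closed-form map
theorem pvWhileR_eq (grid : List (List Int)) (m : Int) :
    ∀ (N : Nat) (a b : Int) (r : List Int), (a + 1).toNat ≤ N →
      pvWhileR grid m a b r =
        r ++ (List.range (min (a + 1) (m - b)).toNat).map
          (fun (k : Nat) => pvCell grid (a - (k : Int)) (b + (k : Int))) := by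
  intro N
  induction N with
  | zero =>
    intro a b r hN
    rw [pvWhileR]
    have h1 : ¬ (a > -1 ∧ b < m) := by omega
    have h2 : (min (a + 1) (m - b)).toNat = 0 := by omega
    simp [h1, h2]
  | succ N ih =>
    intro a b r hN
    rw [pvWhileR]
    by_cases h : a > -1 ∧ b < m
    · rw [if_pos h, ih (a - 1) (b + 1) _ (by omega)]
      have hK : (min (a + 1) (m - b)).toNat = (min (a - 1 + 1) (m - (b + 1))).toNat + 1 := by omega
      rw [hK, pv_map_range_succ]
      simp only [List.append_assoc, List.cons_append, List.nil_append, Nat.cast_zero]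
      congr 1
      congr 1
      · simp
      apply List.map_congr_left
      intro k _
      push_cast
      ring_nf
    · rw [if_neg h]
      have h2 : (min (a + 1) (m - b)).toNat = 0 := by omega
      simp [h2]

-- A's left while loop computes a closed-form map
theorem pvWhileL_eq (grid : List (List Int)) :
    ∀ (N : Nat) (a b : Int) (l : List Int), (a + 1).toNat ≤ N →
      pvWhileL grid a b l =
        l ++ (List.range (min (a + 1) (b + 1)).toNat).map
          (fun (k : Nat) => pvCell grid (a - (k : Int)) (b - (k : Int))) := by
  intro N
  induction N with
  | zero =>
    intro a b l hN
    rw [pvWhileL]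
    have h1 : ¬ (a > -1 ∧ b > -1) := by omega
    have h2 : (min (a + 1) (b + 1)).toNat = 0 := by omega
    simp [h1, h2]
    omega
  | succ N ih =>
    intro a b l hN
    rw [pvWhileL]
    by_cases h : a > -1 ∧ b > -1
    · rw [if_pos h, ih (a - 1) (b - 1) _ (by omega)]
      have hK : (min (a + 1) (b + 1)).toNat = (min (a - 1 + 1) (b - 1 + 1)).toNat + 1 := by omega
      rw [hK, pv_map_range_succ]
      simp only [List.append_assoc, List.cons_append, List.nil_append, Nat.cast_zero]
      congr 1
      congr 1
      · simp
      apply List.map_congr_left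
      intro k _
      push_cast
      ring_nf
    · rw [if_neg h]
      have h2 : (min (a + 1) (b + 1)).toNat = 0 := by omega
      simp [h2]
      omega

theorem pv_range_filter (M : Nat) (t : Int) :
    (List.range M).filter (fun (k : Nat) => (((k : Int)) == t)) =
      if 0 ≤ t ∧ t < (M : Int) then [t.toNat] else [] := by
  induction M with
  | zero =>
    simp
  | succ M ih =>
    rw [List.range_succ, List.filter_append, ih]
    by_cases h : (M : Int) = t
    · have h1 : ¬ (0 ≤ t ∧ t < (M : Int)) := by omega
      have h2 : 0 ≤ t ∧ t < ((M : Int) + 1) := by omega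
      push_cast
      simp [h2, h]
      omega
    · by_cases h2 : 0 ≤ t ∧ t < (M : Int)
      · have h3 : 0 ≤ t ∧ t < (M : Int) + 1 := by omega
        push_cast
        simp [h2, h3, h]
      · have h3 : ¬ (0 ≤ t ∧ t < (M : Int) + 1) := by omega
        push_cast
        simp [h2, h]
        omega

theorem pv_pyRange_filter (m a c : Int) :
    (PySem.List.pyRange 0 m 1).filter (fun b => (a + b == c)) =
      if 0 ≤ c - a ∧ c - a < m then [c - a] else [] := by
  rw [PySem.List.pyRange_one]
  rw [List.filter_map]
  have he : ((fun b => (a + b == c)) ∘ fun (k : Nat) => (0 : Int) + (k : Int))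
      = fun (k : Nat) => (((k : Int)) == (c - a)) := by
    funext k
    simp only [Function.comp]
    by_cases h : (k : Int) = c - a <;> simp [h] <;> omega
  rw [he, pv_range_filter]
  by_cases h : 0 ≤ c - a ∧ c - a < m
  · have h2 : 0 ≤ c - a ∧ c - a < (((m - 0).toNat : Nat) : Int) := by omega
    rw [if_pos h2, if_pos h]
    simp
    omega
  · have h2 : ¬ (0 ≤ c - a ∧ c - a < (((m - 0).toNat : Nat) : Int)) := by omega
    rw [if_neg h2, if_neg h]
    simp

theorem pv_pyRange_filter_sub (m a c : Int) :
    (PySem.List.pyRange 0 m 1).filter (fun b => (a - b == c)) =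
      if 0 ≤ a - c ∧ a - c < m then [a - c] else [] := by
  rw [PySem.List.pyRange_one]
  rw [List.filter_map]
  have he : ((fun b => (a - b == c)) ∘ fun (k : Nat) => (0 : Int) + (k : Int))
      = fun (k : Nat) => (((k : Int)) == (a - c)) := by
    funext k
    simp only [Function.comp]
    by_cases h : (k : Int) = a - c <;> simp [h] <;> omega
  rw [he, pv_range_filter]
  by_cases h : 0 ≤ a - c ∧ a - c < m
  · have h2 : 0 ≤ a - c ∧ a - c < (((m - 0).toNat : Nat) : Int) := by omega
    rw [if_pos h2, if_pos h]
    simp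
    omega
  · have h2 : ¬ (0 ≤ a - c ∧ a - c < (((m - 0).toNat : Nat) : Int)) := by omega
    rw [if_neg h2, if_neg h]
    simp

-- one row's worth of bucket updates, as seen by the lookup key c
theorem pv_inner_getD (grid : List (List Int)) (m a c : Int)
    (key : Int → Int → Int) (d : PySem.Dict Int (List Int)) :
    ((PySem.List.pyRange 0 m 1).foldl
        (fun d b => d.modify (key a b) [] (· ++ [pvCell grid a b])) d).getD c [] =
      d.getD c [] ++
        (((PySem.List.pyRange 0 m 1).filter (fun b => (key a b == c))).map (pvCell grid a)) := by
  have h1 : (PySem.List.pyRange 0 m 1).foldl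
        (fun d b => d.modify (key a b) [] (· ++ [pvCell grid a b])) d
      = (((PySem.List.pyRange 0 m 1).map (fun b => (key a b, pvCell grid a b))).foldl
          (fun d p => d.modify p.1 [] (· ++ [p.2])) d) := by
    rw [List.foldl_map]
  rw [h1, PySem.Dict.getD_foldl_modify_append, List.filter_map, List.map_map]
  rfl

-- the whole bucketing pass, as seen by the lookup key c
theorem pv_rows_getD (grid : List (List Int)) (m c : Int) (key : Int → Int → Int) :
    ∀ (rows : List Int) (d : PySem.Dict Int (List Int)),
      ((rows.foldl (fun d a => (PySem.List.pyRange 0 m 1).foldl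
          (fun d b => d.modify (key a b) [] (· ++ [pvCell grid a b])) d) d)).getD c [] =
        d.getD c [] ++
          rows.flatMap (fun a =>
            ((PySem.List.pyRange 0 m 1).filter (fun b => (key a b == c))).map (pvCell grid a)) := by
  intro rows
  induction rows with
  | nil => intro d; simp
  | cons a rest ih =>
    intro d
    rw [List.foldl_cons, ih, pv_inner_getD, List.flatMap_cons, List.append_assoc]

theorem pv_flatMap_if {α : Type} (l : List Nat) (P : Nat → Prop) [DecidablePred P] (f : Nat → α) :
    l.flatMap (fun k => if P k then [f k] else []) =
      (l.filter (fun k => decide (P k))).map f := by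
  induction l with
  | nil => simp
  | cons x rest ih =>
    by_cases h : P x <;> simp [h, ih]

theorem pv_range_filter_lt (R K : Nat) (hK : K ≤ R) (p : Nat → Bool)
    (h : ∀ k, k < R → p k = decide (k < K)) :
    (List.range R).filter p = List.range K := by
  have hR : R = K + (R - K) := by omega
  rw [hR, List.range_add, List.filter_append]
  have h1 : (List.range K).filter p = List.range K := by
    apply List.filter_eq_self.mpr
    intro k hk
    have := List.mem_range.mp hk
    rw [h k (by omega)]
    simp [this]
  have h2 : (((List.range (R - K)).map (K + ·)).filter p) = [] := by
    apply List.filter_eq_nil_iff.mpr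
    intro k hk
    simp only [List.mem_map] at hk
    obtain ⟨j, hj, rfl⟩ := hk
    have hj2 := List.mem_range.mp hj
    rw [h (K + j) (by omega)]
    simp
  rw [h1, h2, List.append_nil]

-- the right bucket keyed n-1+cdx holds exactly the up-right diagonal, bottom row first
theorem pv_bucketR (grid : List (List Int)) (n m cdx : Int)
    (h0 : 0 ≤ cdx) (hc : cdx < m) :
    (PySem.List.pyRange (n - 1) (n - min n m - 1) (-1)).flatMap
      (fun a => ((PySem.List.pyRange 0 m 1).filter
          (fun b => (a + b == n - 1 + cdx))).map (pvCell grid a)) =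
      (List.range (min n (m - cdx)).toNat).map
        (fun (k : Nat) => pvCell grid (n - 1 - (k : Int)) (cdx + (k : Int))) := by
  rw [PySem.List.pyRange_neg_one, List.flatMap_map]
  have hbody : ∀ (k : Nat),
      ((PySem.List.pyRange 0 m 1).filter
        (fun b => ((n - 1 - (k : Int)) + b == n - 1 + cdx))).map (pvCell grid (n - 1 - (k : Int)))
      = if cdx + (k : Int) < m then [pvCell grid (n - 1 - (k : Int)) (cdx + (k : Int))] else [] := by
    intro k
    rw [pv_pyRange_filter]
    have he : n - 1 + cdx - (n - 1 - (k : Int)) = cdx + (k : Int) := by ring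
    by_cases h : cdx + (k : Int) < m
    · rw [if_pos (by omega), if_pos h, he]
      simp
    · rw [if_neg (by omega), if_neg h]
      simp
  have hMn : (n - 1 - (n - min n m - 1)).toNat = (min n m).toNat := by omega
  rw [hMn]
  calc (List.range (min n m).toNat).flatMap
        (fun (k : Nat) => ((PySem.List.pyRange 0 m 1).filter
          (fun b => ((n - 1 - (k : Int)) + b == n - 1 + cdx))).map (pvCell grid (n - 1 - (k : Int))))
      = (List.range (min n m).toNat).flatMap
        (fun (k : Nat) => if cdx + (k : Int) < m then
            [pvCell grid (n - 1 - (k : Int)) (cdx + (k : Int))] else []) := by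
        rw [List.flatMap_def, List.flatMap_def]
        congr 1
        apply List.map_congr_left
        intro k _
        exact hbody k
    _ = ((List.range (min n m).toNat).filter
          (fun (k : Nat) => decide (cdx + (k : Int) < m))).map
            (fun (k : Nat) => pvCell grid (n - 1 - (k : Int)) (cdx + (k : Int))) :=
        pv_flatMap_if _ (fun k => cdx + (k : Int) < m)
          (fun (k : Nat) => pvCell grid (n - 1 - (k : Int)) (cdx + (k : Int)))
    _ = (List.range (min n (m - cdx)).toNat).map
            (fun (k : Nat) => pvCell grid (n - 1 - (k : Int)) (cdx + (k : Int))) := by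
        rw [pv_range_filter_lt (min n m).toNat (min n (m - cdx)).toNat (by omega)]
        intro k hk
        by_cases h : cdx + (k : Int) < m
        · rw [decide_eq_true h, Eq.comm, decide_eq_true_eq]
          omega
        · rw [decide_eq_false h, Eq.comm, decide_eq_false_iff_not]
          omega

-- the left bucket keyed n-1-cdx holds exactly the up-left diagonal, bottom row first
theorem pv_bucketL (grid : List (List Int)) (n m cdx : Int)
    (h0 : 0 ≤ cdx) (hc : cdx < m) :
    (PySem.List.pyRange (n - 1) (n - min n m - 1) (-1)).flatMap
      (fun a => ((PySem.List.pyRange 0 m 1).filter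
          (fun b => (a - b == n - 1 - cdx))).map (pvCell grid a)) =
      (List.range (min n (cdx + 1)).toNat).map
        (fun (k : Nat) => pvCell grid (n - 1 - (k : Int)) (cdx - (k : Int))) := by
  rw [PySem.List.pyRange_neg_one, List.flatMap_map]
  have hbody : ∀ (k : Nat),
      ((PySem.List.pyRange 0 m 1).filter
        (fun b => ((n - 1 - (k : Int)) - b == n - 1 - cdx))).map (pvCell grid (n - 1 - (k : Int)))
      = if (k : Int) ≤ cdx then [pvCell grid (n - 1 - (k : Int)) (cdx - (k : Int))] else [] := by
    intro k
    rw [pv_pyRange_filter_sub]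
    have he : (n - 1 - (k : Int)) - (n - 1 - cdx) = cdx - (k : Int) := by ring
    by_cases h : (k : Int) ≤ cdx
    · rw [if_pos (by omega), if_pos h, he]
      simp
    · rw [if_neg (by omega), if_neg h]
      simp
  have hMn : (n - 1 - (n - min n m - 1)).toNat = (min n m).toNat := by omega
  rw [hMn]
  calc (List.range (min n m).toNat).flatMap
        (fun (k : Nat) => ((PySem.List.pyRange 0 m 1).filter
          (fun b => ((n - 1 - (k : Int)) - b == n - 1 - cdx))).map (pvCell grid (n - 1 - (k : Int))))
      = (List.range (min n m).toNat).flatMap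
        (fun (k : Nat) => if (k : Int) ≤ cdx then
            [pvCell grid (n - 1 - (k : Int)) (cdx - (k : Int))] else []) := by
        rw [List.flatMap_def, List.flatMap_def]
        congr 1
        apply List.map_congr_left
        intro k _
        exact hbody k
    _ = ((List.range (min n m).toNat).filter
          (fun (k : Nat) => decide ((k : Int) ≤ cdx))).map
            (fun (k : Nat) => pvCell grid (n - 1 - (k : Int)) (cdx - (k : Int))) :=
        pv_flatMap_if _ (fun k => (k : Int) ≤ cdx)
          (fun (k : Nat) => pvCell grid (n - 1 - (k : Int)) (cdx - (k : Int)))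
    _ = (List.range (min n (cdx + 1)).toNat).map
            (fun (k : Nat) => pvCell grid (n - 1 - (k : Int)) (cdx - (k : Int))) := by
        rw [pv_range_filter_lt (min n m).toNat (min n (cdx + 1)).toNat (by omega)]
        intro k hk
        by_cases h : (k : Int) ≤ cdx
        · rw [decide_eq_true h, Eq.comm, decide_eq_true_eq]
          omega
        · rw [decide_eq_false h, Eq.comm, decide_eq_false_iff_not]
          omega

-- B's pair-of-dicts fold is two independent dict folds
theorem pv_split (grid : List (List Int)) (rows cols : List Int) :
    rows.foldl (fun (rl : PySem.Dict Int (List Int) × PySem.Dict Int (List Int)) a =>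
        cols.foldl (fun rl b =>
          (rl.1.modify (a + b) [] (· ++ [pvCell grid a b]),
           rl.2.modify (a - b) [] (· ++ [pvCell grid a b]))) rl)
      (PySem.Dict.empty, PySem.Dict.empty)
    = (rows.foldl (fun d a => cols.foldl
          (fun d b => d.modify (a + b) [] (· ++ [pvCell grid a b])) d) PySem.Dict.empty,
       rows.foldl (fun d a => cols.foldl
          (fun d b => d.modify (a - b) [] (· ++ [pvCell grid a b])) d) PySem.Dict.empty) := by
  have hin : ∀ (rl : PySem.Dict Int (List Int) × PySem.Dict Int (List Int)) (a : Int),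
      cols.foldl (fun rl b =>
          (rl.1.modify (a + b) [] (· ++ [pvCell grid a b]),
           rl.2.modify (a - b) [] (· ++ [pvCell grid a b]))) rl
      = (cols.foldl (fun d b => d.modify (a + b) [] (· ++ [pvCell grid a b])) rl.1,
         cols.foldl (fun d b => d.modify (a - b) [] (· ++ [pvCell grid a b])) rl.2) := by
    intro rl a
    obtain ⟨d1, d2⟩ := rl
    exact PySem.List.foldl_prod_mk
      (f := fun (d : PySem.Dict Int (List Int)) b => d.modify (a + b) [] (· ++ [pvCell grid a b]))
      (g := fun (d : PySem.Dict Int (List Int)) b => d.modify (a - b) [] (· ++ [pvCell grid a b]))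
      cols d1 d2
  have hb : (fun (rl : PySem.Dict Int (List Int) × PySem.Dict Int (List Int)) a =>
        cols.foldl (fun rl b =>
          (rl.1.modify (a + b) [] (· ++ [pvCell grid a b]),
           rl.2.modify (a - b) [] (· ++ [pvCell grid a b]))) rl)
      = (fun rl a =>
          (cols.foldl (fun d b => d.modify (a + b) [] (· ++ [pvCell grid a b])) rl.1,
           cols.foldl (fun d b => d.modify (a - b) [] (· ++ [pvCell grid a b])) rl.2)) :=
    funext fun rl => funext fun a => hin rl a
  rw [hb]
  exact PySem.List.foldl_prod_mk
    (f := fun (d : PySem.Dict Int (List Int)) a => cols.foldl (fun d b => d.modify (a + b) [] (· ++ [pvCell grid a b])) d)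
    (g := fun (d : PySem.Dict Int (List Int)) a => cols.foldl (fun d b => d.modify (a - b) [] (· ++ [pvCell grid a b])) d)
    rows PySem.Dict.empty PySem.Dict.empty

-- the right dict at key n-1+cdx is the up-right diagonal
theorem pv_getD_R (grid : List (List Int)) (m cdx : Int) (h0 : 0 ≤ cdx) (hc : cdx < m) :
    (((PySem.List.pyRange ((grid.length : Int) - 1)
        ((grid.length : Int) - min (grid.length : Int) m - 1) (-1)).foldl
      (fun d a => (PySem.List.pyRange 0 m 1).foldl
        (fun d b => d.modify (a + b) [] (· ++ [pvCell grid a b])) d)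
      PySem.Dict.empty).getD ((grid.length : Int) - 1 + cdx) [])
    = (List.range (min (grid.length : Int) (m - cdx)).toNat).map
        (fun (k : Nat) => pvCell grid ((grid.length : Int) - 1 - (k : Int)) (cdx + (k : Int))) := by
  have h := pv_rows_getD grid m ((grid.length : Int) - 1 + cdx) (fun a b => a + b)
    (PySem.List.pyRange ((grid.length : Int) - 1)
      ((grid.length : Int) - min (grid.length : Int) m - 1) (-1)) PySem.Dict.empty
  simp only [] at h
  rw [h, PySem.Dict.getD_empty, List.nil_append]
  exact pv_bucketR grid (grid.length : Int) m cdx h0 hc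

-- the left dict at key n-1-cdx is the up-left diagonal
theorem pv_getD_L (grid : List (List Int)) (m cdx : Int) (h0 : 0 ≤ cdx) (hc : cdx < m) :
    (((PySem.List.pyRange ((grid.length : Int) - 1)
        ((grid.length : Int) - min (grid.length : Int) m - 1) (-1)).foldl
      (fun d a => (PySem.List.pyRange 0 m 1).foldl
        (fun d b => d.modify (a - b) [] (· ++ [pvCell grid a b])) d)
      PySem.Dict.empty).getD ((grid.length : Int) - 1 - cdx) [])
    = (List.range (min (grid.length : Int) (cdx + 1)).toNat).map
        (fun (k : Nat) => pvCell grid ((grid.length : Int) - 1 - (k : Int)) (cdx - (k : Int))) := by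
  have h := pv_rows_getD grid m ((grid.length : Int) - 1 - cdx) (fun a b => a - b)
    (PySem.List.pyRange ((grid.length : Int) - 1)
      ((grid.length : Int) - min (grid.length : Int) m - 1) (-1)) PySem.Dict.empty
  simp only [] at h
  rw [h, PySem.Dict.getD_empty, List.nil_append]
  exact pv_bucketL grid (grid.length : Int) m cdx h0 hc

-- A's right diagonal list, head merged into the closed form
theorem pv_diagR_eq (grid : List (List Int)) (m cdx : Int)
    (hgrid : grid ≠ []) (hc : cdx < m) :
    pvWhileR grid m ((grid.length : Int) - 1 - 1) (cdx + 1)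
        [pvCell grid ((grid.length : Int) - 1) cdx]
    = (List.range (min (grid.length : Int) (m - cdx)).toNat).map
        (fun (k : Nat) => pvCell grid ((grid.length : Int) - 1 - (k : Int)) (cdx + (k : Int))) := by
  have hn : 1 ≤ (grid.length : Int) := by
    have := List.length_pos_of_ne_nil hgrid
    omega
  rw [pvWhileR_eq grid m (grid.length) _ _ _ (by omega)]
  have hK : (min (grid.length : Int) (m - cdx)).toNat
      = (min ((grid.length : Int) - 1 - 1 + 1) (m - (cdx + 1))).toNat + 1 := by omega
  rw [hK, pv_map_range_succ, List.singleton_append]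
  congr 1
  · norm_num
  · apply List.map_congr_left
    intro k hk
    push_cast
    ring_nf

-- A's left diagonal list, head merged into the closed form
theorem pv_diagL_eq (grid : List (List Int)) (cdx : Int)
    (hgrid : grid ≠ []) (h0 : 0 ≤ cdx) :
    pvWhileL grid ((grid.length : Int) - 1 - 1) (cdx - 1)
        [pvCell grid ((grid.length : Int) - 1) cdx]
    = (List.range (min (grid.length : Int) (cdx + 1)).toNat).map
        (fun (k : Nat) => pvCell grid ((grid.length : Int) - 1 - (k : Int)) (cdx - (k : Int))) := by
  have hn : 1 ≤ (grid.length : Int) := by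
    have := List.length_pos_of_ne_nil hgrid
    omega
  rw [pvWhileL_eq grid (grid.length) _ _ _ (by omega)]
  have hK : (min (grid.length : Int) (cdx + 1)).toNat
      = (min ((grid.length : Int) - 1 - 1 + 1) (cdx - 1 + 1)).toNat + 1 := by omega
  rw [hK, pv_map_range_succ, List.singleton_append]
  congr 1
  · norm_num
  · apply List.map_congr_left
    intro k hk
    push_cast
    ring_nf

-- the two ports agree on every input
theorem pv_main (grid : List (List Int)) (min_length : Int) :
    get_bottom_diags grid min_length = get_bottom_diags_alt grid min_length := by
  unfold get_bottom_diags get_bottom_diags_alt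
  dsimp only
  rw [pv_split]
  apply PySem.List.foldl_congr_mem
  intro acc cdx hmem
  obtain ⟨h0, hc⟩ := (PySem.List.mem_pyRange_one).mp hmem
  have hgrid : grid ≠ [] := by
    intro h
    subst h
    have he : PySem.List.pyGetD ([] : List (List Int)) 0 [] = [] := rfl
    rw [he] at hc
    simp at hc
    omega
  rw [pv_getD_R grid _ cdx h0 hc, pv_getD_L grid _ cdx h0 hc,
      pv_diagR_eq grid _ cdx hgrid hc, pv_diagL_eq grid cdx hgrid h0]

-- ===== VERDICT (by name: the statement is the Claim_ definition above) =====
theorem get_bottom_diags_spec : Claim_equal_get_bottom_diags := by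
  unfold Claim_equal_get_bottom_diags
  intro grid min_length _ _
  exact pv_main grid min_length
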